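-- pv_equiv track=rewrite | github.com/MrBrantCode/unitest_baseline | mut_generate/mist_train_cf/cf_54684/solution.py | reverse_odd
-- ===== SOURCE A (Python) =====
-- def reverse_odd(s: str):
--     even_chars = list(s[::2])   # list of characters at even indices
--     odd_chars = list(s[1::2])   # list of characters at odd indices
--
--     odd_chars.reverse()         # reverse the list of odd-indexed characters
--
--     # Merge the two lists
--     result = []
--     for e, o in zip(even_chars, odd_chars + ['']):
--         result.append(e)
--         result.append(o)
--
--     return ''.join(result)
-- ===== SOURCE B (Python) =====
-- def reverse_odd(s: str):
--     n = len(s)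
--     m = n if n % 2 == 0 else n - 1
--     return ''.join(s[k] if k % 2 == 0 else s[m - k] for k in range(n))
-- ===== Notes on version B (the rewrite author's own statement) =====
-- stated objective: simpler
-- what changed: Instead of slicing out even- and odd-indexed characters into two lists, reversing one, and zip-merging them back (with a '' sentinel), B does a single pass over the indices with a closed-form map: position k keeps s[k] when k is even and reads s[m-k] (m = n or n-1 by parity) when k is odd.
import Mathlib
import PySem

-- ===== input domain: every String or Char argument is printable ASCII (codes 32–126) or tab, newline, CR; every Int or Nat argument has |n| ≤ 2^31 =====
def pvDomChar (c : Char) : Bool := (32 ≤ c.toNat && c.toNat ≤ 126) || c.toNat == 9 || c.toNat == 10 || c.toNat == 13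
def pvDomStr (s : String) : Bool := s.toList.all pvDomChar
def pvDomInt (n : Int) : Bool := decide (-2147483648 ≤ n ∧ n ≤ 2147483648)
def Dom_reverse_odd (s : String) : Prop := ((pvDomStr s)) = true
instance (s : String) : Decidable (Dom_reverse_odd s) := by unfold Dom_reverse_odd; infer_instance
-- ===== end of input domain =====

-- B replaces A's slice/reverse/zip-merge pipeline by a single range pass with a closed-form
-- index map (odd position k reads position m - k); objective: simpler, same cost.

-- ===== PORT A =====
-- even_chars/odd_chars are char lists; the zip partner models Python's 'odd_chars + [""]'
-- as List (List Char) with [] for the empty string ('' contributes no characters to join).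
def reverse_odd (s : String) : String :=
  let even_chars : List Char := (PySem.List.slice? s.toList none none 2).getD []
  let odd_chars0 : List Char := (PySem.List.slice? s.toList (some 1) none 2).getD []
  let odd_chars := odd_chars0.reverse
  let result := (List.zip even_chars (odd_chars.map (fun c => [c]) ++ [([] : List Char)])).foldl
      (fun acc p => acc ++ [p.1] ++ p.2) []
  String.ofList result

-- ===== PORT B =====
-- the in-range index s[k] / s[m-k] is ported with pyGetD (the index is always valid here)
def reverse_odd_alt (s : String) : String :=
  let l := s.toList
  let n : Int := (l.length : Int)
  let m : Int := if PySem.Int.mod n 2 = 0 then n else n - 1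
  String.ofList ((PySem.List.pyRange 0 n 1).map (fun k =>
    if PySem.Int.mod k 2 = 0 then PySem.List.pyGetD l k ' ' else PySem.List.pyGetD l (m - k) ' '))

-- ===== PRECONDITION & SPEC =====
def Spec_reverse_odd (s : String) (out : String) : Prop := out = reverse_odd_alt s
instance (s : String) (out : String) : Decidable (Spec_reverse_odd s out) := by unfold Spec_reverse_odd; infer_instance

-- ===== CLAIM (what is proved, stated in full; the proofs are below) =====
def Claim_equal_reverse_odd : Prop := ∀ (s : String), Dom_reverse_odd s → Spec_reverse_odd s (reverse_odd s)

-- ===== LEMMAS AND PROOFS =====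

theorem pv_filterMap_eq_map {α β : Type} (f : α → Option β) (g : α → β) :
    ∀ (l : List α), (∀ a ∈ l, f a = some (g a)) → l.filterMap f = l.map g := by
  intro l
  induction l with
  | nil => intro _; rfl
  | cons a t ih =>
      intro h
      simp [h a (by simp), ih (fun b hb => h b (by simp [hb]))]

-- A's s[::2] is the map k ↦ l[2k] over k < ⌈n/2⌉
theorem pv_slice_ev (l : List Char) :
    PySem.List.slice? l none none 2 =
      some ((List.range ((l.length + 1) / 2)).map (fun k => l.getD (2 * k) ' ')) := by
  rw [PySem.List.slice?]
  norm_num [PySem.List.sliceIndices]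
  have hc : ((l.length : Int) + 2 - 1) / 2 = (((l.length + 1) / 2 : Nat) : Int) := by
    rw [Int.natCast_div]
    push_cast
    ring_nf
  split
  · next h =>
    rw [hc, Int.toNat_natCast]
    apply pv_filterMap_eq_map
    intro k hk
    simp only [List.mem_range] at hk
    have h2k : 2 * k < l.length := by omega
    have ht : (2 * (k : Int)).toNat = 2 * k := by omega
    rw [ht, List.getElem?_eq_getElem h2k]
    simp
  · next h =>
    have h0 : l.length = 0 := by omega
    simp [h0]

-- A's s[1::2] is the map k ↦ l[2k+1] over k < ⌊n/2⌋
theorem pv_slice_od (l : List Char) :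
    PySem.List.slice? l (some 1) none 2 =
      some ((List.range (l.length / 2)).map (fun k => l.getD (2 * k + 1) ' ')) := by
  rw [PySem.List.slice?]
  norm_num [PySem.List.sliceIndices]
  rcases Nat.eq_zero_or_pos l.length with h0 | hpos
  · simp [h0]
  · have hmin : min 1 (l.length : Int) = 1 := by omega
    rw [hmin]
    by_cases h1 : 1 < l.length
    · rw [if_pos h1]
      have hc : (((l.length : Int) - 1 + 2 - 1) / 2).toNat = l.length / 2 := by
        have he : ((l.length : Int) - 1 + 2 - 1) = ((l.length : Nat) : Int) := by ring
        rw [he, show ((2 : Int)) = ((2 : Nat) : Int) from rfl, ← Int.natCast_div, Int.toNat_natCast]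
      rw [hc]
      apply pv_filterMap_eq_map
      intro k hk
      simp only [List.mem_range] at hk
      have h2k : 2 * k + 1 < l.length := by omega
      have ht : (1 + 2 * (k : Int)).toNat = 2 * k + 1 := by omega
      rw [ht, List.getElem?_eq_getElem h2k]
      simp
    · have hl1 : l.length = 1 := by omega
      simp [hl1]

theorem pv_reverse_map_range {α : Type} (g : Nat → α) (m : Nat) :
    ((List.range m).map g).reverse = (List.range m).map (fun k => g (m - 1 - k)) := by
  apply List.ext_getElem
  · simp
  · intro i h1 h2
    simp [List.getElem_reverse]

theorem pv_zip_map {α β : Type} (g : Nat → α) (os : List β) (d : β) (m : Nat) (h : m ≤ os.length) :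
    List.zip ((List.range m).map g) os = (List.range m).map (fun k => (g k, os.getD k d)) := by
  apply List.ext_getElem
  · simp; omega
  · intro i h1 h2
    simp only [List.getElem_zip, List.getElem_map, List.getElem_range]
    simp at h2
    rw [List.getD_eq_getElem os d (by omega)]

-- pairing a range-map into blocks of two
theorem pv_pairs {α : Type} : ∀ (n : Nat) (f : Nat → α),
    (List.range n).map f =
      (List.range ((n + 1) / 2)).flatMap
        (fun k => f (2 * k) :: (if 2 * k + 1 < n then [f (2 * k + 1)] else [])) := by
  intro n
  induction n using Nat.strong_induction_on with
  | _ n ih =>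
    match n with
    | 0 => intro f; simp
    | 1 => intro f; simp [List.range_succ]
    | Nat.succ (Nat.succ n) =>
      intro f
      have h2 : (n + 2 + 1) / 2 = (n + 1) / 2 + 1 := by omega
      rw [h2, List.range_succ_eq_map, List.range_succ_eq_map, List.range_succ_eq_map,
          List.map_cons, List.map_map, List.map_cons, List.map_map,
          List.flatMap_cons, List.flatMap_map]
      have hblk :
          (fun k => (fun k => f (2 * k) :: (if 2 * k + 1 < n + 2 then [f (2 * k + 1)] else [])) (k + 1)) =
          (fun k => (fun j => f (j + 2)) (2 * k) ::
            (if 2 * k + 1 < n then [(fun j => f (j + 2)) (2 * k + 1)] else [])) := by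
        funext k
        have h2k : 2 * (k + 1) = 2 * k + 2 := by omega
        simp only [h2k]
        by_cases h : 2 * k + 1 < n <;> simp [h] <;> omega
      rw [hblk, ← ih n (by omega) (fun j => f (j + 2))]
      simp [Function.comp, Nat.succ_eq_add_one]

-- A's merged list equals the index map j ↦ l[j] / l[m' - j]
theorem pv_listA (l : List Char) :
    (List.zip ((PySem.List.slice? l none none 2).getD [])
        (((((PySem.List.slice? l (some 1) none 2).getD []).reverse).map (fun c => [c])) ++ [([] : List Char)])).foldl
      (fun acc p => acc ++ [p.1] ++ p.2) []
    = (List.range l.length).map (fun j => if j % 2 = 0 then l.getD j ' '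
        else l.getD ((if l.length % 2 = 0 then l.length else l.length - 1) - j) ' ') := by
  rw [pv_slice_ev, pv_slice_od]
  simp only [Option.getD_some]
  rw [pv_reverse_map_range, List.map_map]
  rw [pv_zip_map _ _ ([] : List Char) ((l.length + 1) / 2) (by simp; omega)]
  have hfun : (fun (acc : List Char) (p : Char × List Char) => acc ++ [p.1] ++ p.2)
      = (fun (acc : List Char) (p : Char × List Char) => acc ++ ([p.1] ++ p.2)) := by
    funext acc p; simp
  rw [hfun, PySem.List.foldl_append_eq_flatMap, List.nil_append, List.flatMap_map]
  rw [pv_pairs l.length (fun j => if j % 2 = 0 then l.getD j ' '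
        else l.getD ((if l.length % 2 = 0 then l.length else l.length - 1) - j) ' ')]
  rw [List.flatMap_def, List.flatMap_def]
  congr 1
  apply List.map_congr_left
  intro k hk
  simp only [List.mem_range] at hk
  have hev : 2 * k % 2 = 0 := by omega
  rw [if_pos hev]
  by_cases hkon : k < l.length / 2
  · have hlt : 2 * k + 1 < l.length := by omega
    rw [if_pos hlt]
    have hodd : ¬ ((2 * k + 1) % 2 = 0) := by omega
    rw [if_neg hodd]
    have hgetd : (List.map ((fun c => [c]) ∘ fun k => l.getD (2 * (l.length / 2 - 1 - k) + 1) ' ') (List.range (l.length / 2)) ++ [([] : List Char)]).getD k []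
        = [l.getD (2 * (l.length / 2 - 1 - k) + 1) ' '] := by
      rw [List.getD_eq_getElem _ _ (by simp; omega)]
      rw [List.getElem_append_left (by simp [hkon])]
      simp
    rw [hgetd]
    have hidx : 2 * (l.length / 2 - 1 - k) + 1 = (if l.length % 2 = 0 then l.length else l.length - 1) - (2 * k + 1) := by
      by_cases hn : l.length % 2 = 0 <;> simp [hn] <;> omega
    rw [hidx]
    simp
  · have hnlt : ¬ (2 * k + 1 < l.length) := by omega
    rw [if_neg hnlt]
    have hgetd : (List.map ((fun c => [c]) ∘ fun k => l.getD (2 * (l.length / 2 - 1 - k) + 1) ' ') (List.range (l.length / 2)) ++ [([] : List Char)]).getD k []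
        = [] := by
      rw [List.getD_eq_getElem _ _ (by simp; omega)]
      rw [List.getElem_append_right (by simp; omega)]
      simp
    rw [hgetd]
    simp

-- B's range pass equals the same index map
theorem pv_listB (l : List Char) :
    ((PySem.List.pyRange 0 (l.length : Int) 1).map (fun k =>
      if PySem.Int.mod k 2 = 0 then PySem.List.pyGetD l k ' '
      else PySem.List.pyGetD l ((if PySem.Int.mod (l.length : Int) 2 = 0 then (l.length : Int) else (l.length : Int) - 1) - k) ' '))
    = (List.range l.length).map (fun j => if j % 2 = 0 then l.getD j ' '
        else l.getD ((if l.length % 2 = 0 then l.length else l.length - 1) - j) ' ') := by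
  rw [PySem.List.pyRange_zero_nat, List.map_map]
  apply List.map_congr_left
  intro j hj
  simp only [List.mem_range] at hj
  simp only [Function.comp]
  have hmj : PySem.Int.mod (j : Int) 2 = ((j % 2 : Nat) : Int) := by
    exact_mod_cast PySem.Int.mod_natCast j 2
  have hmn : PySem.Int.mod (l.length : Int) 2 = ((l.length % 2 : Nat) : Int) := by
    exact_mod_cast PySem.Int.mod_natCast l.length 2
  rw [hmj, hmn]
  by_cases hje : j % 2 = 0
  · simp [hje, PySem.List.pyGetD_natCast]
  · have hne : ¬ (((j % 2 : Nat) : Int) = 0) := by omega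
    rw [if_neg hne, if_neg hje]
    by_cases hn : l.length % 2 = 0
    · have hcast : (l.length : Int) - (j : Int) = ((l.length - j : Nat) : Int) := by omega
      simp [hn, hcast, PySem.List.pyGetD_natCast]
    · have hne2 : ¬ (((l.length % 2 : Nat) : Int) = 0) := by omega
      have hcast : (l.length : Int) - 1 - (j : Int) = ((l.length - 1 - j : Nat) : Int) := by omega
      rw [if_neg hne2, if_neg hn, hcast, PySem.List.pyGetD_natCast]

-- ===== VERDICT (by name: the statement is the Claim_ definition above) =====
theorem reverse_odd_spec : Claim_equal_reverse_odd := by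
  intro s _
  unfold Spec_reverse_odd reverse_odd reverse_odd_alt
  simp only []
  congr 1
  rw [pv_listA, pv_listB]
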